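-- pv_equiv track=rewrite | github.com/johnstonjacob/ccits_scripts | untagged_resource_checker/main.py | group_instances_by_region
-- ===== SOURCE A (Python) =====
-- def group_instances_by_region(instances):
--     instances_by_region = {}
--     for instance in instances:
--         instance_id = instance['instance_id']
--         region = instance['region_name']
--         if region not in instances_by_region:
--             instances_by_region[region] = [instance_id]
--         else:
--             instances_by_region[region].append(instance_id)
--
--     return instances_by_region
-- ===== SOURCE B (Python) =====
-- def group_instances_by_region(instances):
--     # Two-pass decomposition: first collect the distinct regions in first-seen
--     # order, then build each region's id list with a comprehension over the input.
--     regions = []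
--     for instance in instances:
--         region = instance['region_name']
--         if region not in regions:
--             regions.append(region)
--     return {
--         region: [instance['instance_id'] for instance in instances
--                  if instance['region_name'] == region]
--         for region in regions
--     }
-- ===== Notes on version B (the rewrite author's own statement) =====
-- stated objective: alternative
-- what changed: Replaces the single hash-dict accumulation pass by a two-pass decomposition: one scan collecting distinct regions in first-seen order, then a dict comprehension that builds each region's id list by filtering the input.
import Mathlib
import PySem

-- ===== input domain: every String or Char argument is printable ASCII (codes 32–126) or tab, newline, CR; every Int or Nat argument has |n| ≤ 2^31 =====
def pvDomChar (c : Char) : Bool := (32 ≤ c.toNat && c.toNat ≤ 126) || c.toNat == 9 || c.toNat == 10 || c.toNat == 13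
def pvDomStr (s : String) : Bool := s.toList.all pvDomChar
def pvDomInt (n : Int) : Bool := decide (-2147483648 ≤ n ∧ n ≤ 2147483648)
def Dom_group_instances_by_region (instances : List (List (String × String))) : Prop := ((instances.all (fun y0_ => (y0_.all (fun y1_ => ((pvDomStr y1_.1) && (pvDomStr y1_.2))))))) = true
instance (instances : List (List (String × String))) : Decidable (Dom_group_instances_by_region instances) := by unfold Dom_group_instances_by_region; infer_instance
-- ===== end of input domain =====

-- B replaces A's single hash-dict accumulation pass by a two-pass decomposition
-- (distinct regions first, then a per-region filtering comprehension); same results.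

-- inst['k'] on an assoc-list dict: first match; "" is never reached under Pre_ (both keys present)
def pvKeyD (inst : List (String × String)) (k : String) : String :=
  ((PySem.Dict.mk inst).get? k).getD ""

-- ===== PORT A =====
def group_instances_by_region (instances : List (List (String × String))) : List (String × List String) :=
  (instances.foldl (fun instances_by_region instance_ =>
      let instance_id := pvKeyD instance_ "instance_id"
      let region := pvKeyD instance_ "region_name"
      if !(instances_by_region.contains region) then
        instances_by_region.insert region [instance_id]
      else
        instances_by_region.modify region [] (fun l => l ++ [instance_id]))
    PySem.Dict.empty).items

-- ===== PORT B =====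
def group_instances_by_region_alt (instances : List (List (String × String))) : List (String × List String) :=
  let regions := instances.foldl (fun regions instance_ =>
      let region := pvKeyD instance_ "region_name"
      if region ∈ regions then regions else regions ++ [region]) []
  regions.map (fun region =>
    (region, (instances.filter (fun instance_ => pvKeyD instance_ "region_name" == region)).map
               (fun instance_ => pvKeyD instance_ "instance_id")))

-- ===== PRECONDITION & SPEC =====
-- Pre_ excludes instances missing the 'instance_id' or 'region_name' key, on which Python A raises KeyError.
def Pre_group_instances_by_region (instances : List (List (String × String))) : Prop :=
  ∀ inst ∈ instances, "instance_id" ∈ inst.map Prod.fst ∧ "region_name" ∈ inst.map Prod.fst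
instance (instances : List (List (String × String))) : Decidable (Pre_group_instances_by_region instances) := by unfold Pre_group_instances_by_region; infer_instance
def pvWitness_group_instances_by_region : (List (List (String × String))) :=
  [[("instance_id", "i-1"), ("region_name", "us-east-1")],
   [("instance_id", "i-2"), ("region_name", "us-east-1")]]

def Spec_group_instances_by_region (instances : List (List (String × String))) (out : List (String × List String)) : Prop := out = group_instances_by_region_alt instances
instance (instances : List (List (String × String))) (out : List (String × List String)) : Decidable (Spec_group_instances_by_region instances out) := by unfold Spec_group_instances_by_region; infer_instance

-- ===== CLAIM (what is proved, stated in full; the proofs are below) =====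
def Claim_equal_group_instances_by_region : Prop := ∀ (instances : List (List (String × String))), Dom_group_instances_by_region instances → Pre_group_instances_by_region instances → Spec_group_instances_by_region instances (group_instances_by_region instances)

-- ===== LEMMAS AND PROOFS =====

-- A's loop body is exactly a Dict.modify with default []
theorem stepA_eq_modify (d : PySem.Dict String (List String)) (inst : List (String × String)) :
    (if !(d.contains (pvKeyD inst "region_name")) then
        d.insert (pvKeyD inst "region_name") [pvKeyD inst "instance_id"]
      else d.modify (pvKeyD inst "region_name") [] (fun l => l ++ [pvKeyD inst "instance_id"]))
    = d.modify (pvKeyD inst "region_name") [] (fun l => l ++ [pvKeyD inst "instance_id"]) := by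
  by_cases h : d.contains (pvKeyD inst "region_name")
  · simp [h]
  · simp only [h, Bool.not_false, if_pos]
    simp only [PySem.Dict.modify, PySem.Dict.insert, PySem.Dict.contains, PySem.Dict.getD,
      PySem.Dict.get?] at h ⊢
    simp only [List.any_eq_true, beq_iff_eq, not_exists, not_and] at h
    have hfind : List.find? (fun p => p.1 == pvKeyD inst "region_name") d.items = none := by
      rw [List.find?_eq_none]
      intro p hp hb
      exact absurd (beq_iff_eq.mp hb) (h p hp)
    simp [hfind]

theorem group_instances_by_region_spec' (instances : List (List (String × String))) :
    group_instances_by_region instances = group_instances_by_region_alt instances := by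
  unfold group_instances_by_region group_instances_by_region_alt
  simp only [stepA_eq_modify]
  -- B's region list is the Set fold, i.e. the distinct region names in first-seen order
  have hreg : (instances.foldl (fun regions instance_ =>
      let region := pvKeyD instance_ "region_name"
      if region ∈ regions then regions else regions ++ [region]) [])
      = PySem.Set.ofList (instances.map (fun i => pvKeyD i "region_name")) := by
    rw [← PySem.Set.update_nil_left, PySem.Set.update_map_eq_foldl_add]
    simp only [PySem.Set.add_eq_ite]
  have hnodup : (instances.foldl (fun d i =>
      d.modify (pvKeyD i "region_name") [] (fun l => l ++ [pvKeyD i "instance_id"]))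
      (PySem.Dict.empty : PySem.Dict String (List String))).keys.Nodup :=
    PySem.Dict.nodup_keys_foldl_modify_key instances (fun i => pvKeyD i "region_name") []
      (fun _ i => (fun l => l ++ [pvKeyD i "instance_id"])) PySem.Dict.empty (by simp)
  have hkeys : (instances.foldl (fun d i =>
      d.modify (pvKeyD i "region_name") [] (fun l => l ++ [pvKeyD i "instance_id"]))
      (PySem.Dict.empty : PySem.Dict String (List String))).keys
      = PySem.Set.ofList (instances.map (fun i => pvKeyD i "region_name")) := by
    rw [PySem.Dict.keys_foldl_modify_key]
    simp [PySem.Set.update_nil_left]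
  have hgetD : ∀ c, (instances.foldl (fun d i =>
      d.modify (pvKeyD i "region_name") [] (fun l => l ++ [pvKeyD i "instance_id"]))
      (PySem.Dict.empty : PySem.Dict String (List String))).getD c []
      = (instances.filter (fun i => pvKeyD i "region_name" == c)).map
          (fun i => pvKeyD i "instance_id") := by
    intro c
    rw [show (instances.foldl (fun d i =>
        d.modify (pvKeyD i "region_name") [] (fun l => l ++ [pvKeyD i "instance_id"]))
        (PySem.Dict.empty : PySem.Dict String (List String)))
      = ((instances.map (fun i => (pvKeyD i "region_name", pvKeyD i "instance_id"))).foldl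
          (fun d p => d.modify p.1 [] (fun l => l ++ [p.2])) PySem.Dict.empty) from
      (List.foldl_map (f := fun i : List (String × String) => (pvKeyD i "region_name", pvKeyD i "instance_id"))
        (g := fun (d : PySem.Dict String (List String)) p => d.modify p.1 [] (fun l => l ++ [p.2]))
        (l := instances) (init := PySem.Dict.empty)).symm]
    rw [PySem.Dict.getD_foldl_modify_append]
    rw [List.filter_map, List.map_map]
    simp [Function.comp_def]
  rw [PySem.Dict.items_eq_map_keys _ hnodup [], hkeys, hreg]
  apply List.map_congr_left
  intro k _
  rw [hgetD]

-- ===== VERDICT (by name: the statement is the Claim_ definition above) =====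
theorem group_instances_by_region_spec : Claim_equal_group_instances_by_region := by
  intro instances _ _
  exact group_instances_by_region_spec' instances
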